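-- pv_equiv track=rewrite | github.com/Cyborgninja21/pychivalry | pychivalry/scopes.py | parse_list_iterator
-- ===== SOURCE A (Python) =====
-- from typing import List, Tuple, Optional, Dict
--
-- def get_list_prefixes() -> List[str]:
--     """
--     Get all valid list iteration prefixes used in CK3 scripting.
--
--     List iteration prefixes are combined with list bases to create iteration commands:
--     - any_: Creates a trigger that checks if any item matches (e.g., any_vassal)
--     - every_: Creates an effect that applies to all items (e.g., every_vassal)
--     - random_: Creates an effect for one random item (e.g., random_vassal)
--     - ordered_: Creates an effect for items in sorted order (e.g., ordered_vassal)
--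
--     Returns:
--         List of four standard list prefixes used in CK3
--
--     Examples:
--         >>> get_list_prefixes()
--         ['any_', 'every_', 'random_', 'ordered_']
--
--     Usage in CK3:
--         any_vassal = { ... }      # Trigger: checks if any vassal matches
--         every_vassal = { ... }    # Effect: applies to all vassals
--         random_vassal = { ... }   # Effect: applies to one random vassal
--         ordered_vassal = { ... }  # Effect: applies in sorted order
--     """
--     # These four prefixes are standard across all CK3 list iterations
--     # They are hardcoded as they are part of the core CK3 scripting language
--     return ["any_", "every_", "random_", "ordered_"]
--
-- def parse_list_iterator(identifier: str) -> Optional[Tuple[str, str]]: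
--     """
--     Parse a list iterator identifier into its prefix and base components.
--
--     List iterators follow the pattern: prefix + base (e.g., 'every_' + 'vassal').
--     This function splits an identifier into these components if it matches
--     a valid list iterator pattern.
--
--     Algorithm:
--     1. Check if identifier is a special non-iterator keyword
--     2. For each valid prefix:
--        a. Check if identifier starts with that prefix
--        b. If yes, extract the base name (everything after prefix)
--        c. Return (prefix, base) tuple
--     3. Return None if no prefix matches
--
--     Args:
--         identifier: The identifier to parse (e.g., 'every_vassal', 'any_child')
--                    Must be a string that might be a list iterator
--
--     Returns:
--         Tuple of (prefix, base) if valid list iterator, None otherwise.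
--         - prefix: One of 'any_', 'every_', 'random_', 'ordered_'
--         - base: The list base name (e.g., 'vassal', 'child', 'courtier')
--
--     Examples:
--         >>> parse_list_iterator('every_vassal')
--         ('every_', 'vassal')
--
--         >>> parse_list_iterator('any_child')
--         ('any_', 'child')
--
--         >>> parse_list_iterator('random_list')
--         None  # Special keyword, not a list iterator
--
--         >>> parse_list_iterator('add_gold')
--         None  # Not a list iterator pattern
--
--     Special Cases:
--         Some identifiers look like list iterators but aren't:
--         - random_list: A different construct for weighted random selection
--         - ordered_list: A different construct for ordered selection
--         - any_of, every_one: Logic operators, not iterators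
--
--     Performance:
--         O(1) for special case check, O(4) = O(1) for prefix matching
--         (only 4 prefixes to check)
--     """
--     # Define special cases that look like list iterators but aren't
--     # These are control flow or logic constructs with different semantics
--     NON_LIST_ITERATORS = {"random_list", "ordered_list", "any_of", "every_one"}
--
--     # Quick check: if identifier is a special non-iterator, return None immediately
--     if identifier in NON_LIST_ITERATORS:
--         return None
--
--     # Try each valid list prefix in order
--     for prefix in get_list_prefixes():
--         # Check if the identifier starts with this prefix
--         if identifier.startswith(prefix):
--             # Extract the base name by removing the prefix
--             # Example: 'every_vassal'[6:] = 'vassal'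
--             base = identifier[len(prefix):]
--             # Return the parsed components as a tuple
--             return (prefix, base)
--
--     # No matching prefix found - not a valid list iterator
--     return None
-- ===== SOURCE B (Python) =====
-- def parse_list_iterator(identifier):
--     # Index on the first underscore instead of scanning prefixes with startswith.
--     if identifier in {"random_list", "ordered_list", "any_of", "every_one"}:
--         return None
--     word, sep, rest = identifier.partition('_')
--     if sep == '_' and word in {"any", "every", "random", "ordered"}:
--         return (word + '_', rest)
--     return None
-- ===== Notes on version B (the rewrite author's own statement) =====
-- stated objective: idiomatic
-- what changed: Replaces the loop of four startswith tests and a slice by a single partition at the first underscore followed by a set-membership test on the word before it.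
import Mathlib
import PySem

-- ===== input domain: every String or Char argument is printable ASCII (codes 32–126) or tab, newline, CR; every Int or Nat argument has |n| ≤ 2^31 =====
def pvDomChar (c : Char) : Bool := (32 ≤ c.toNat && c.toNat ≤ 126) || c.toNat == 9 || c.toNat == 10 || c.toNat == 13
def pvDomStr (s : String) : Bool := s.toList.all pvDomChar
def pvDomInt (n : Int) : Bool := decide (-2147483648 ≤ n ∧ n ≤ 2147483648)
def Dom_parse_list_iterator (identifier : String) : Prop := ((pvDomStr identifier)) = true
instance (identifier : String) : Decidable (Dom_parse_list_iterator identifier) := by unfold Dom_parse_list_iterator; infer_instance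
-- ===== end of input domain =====

-- B replaces A's loop of four startswith tests by one partition at the first underscore (idiomatic; same cost).

-- ===== PORT A =====
-- helper: get_list_prefixes()
def get_list_prefixes : List String := ["any_", "every_", "random_", "ordered_"]

-- the 'for prefix in get_list_prefixes(): …' loop of A
def pvLoopA : List String → String → Option (String × String)
  | [], _ => none
  | p :: ps, ident =>
    if PySem.Str.startswith ident p then
      some (p, String.ofList (PySem.List.slice ident.toList (some (PySem.Str.len p : Int)) none))
    else pvLoopA ps ident

def parse_list_iterator (identifier : String) : Option (String × String) :=
  -- 'if identifier in NON_LIST_ITERATORS'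
  if (PySem.Set.ofList ["random_list", "ordered_list", "any_of", "every_one"]).contains identifier then
    none
  else
    pvLoopA get_list_prefixes identifier

-- ===== PORT B =====
-- hand port of str.partition('_') on List Char (exact: word = chars before the first '_';
-- a separator was found iff dropWhile is nonempty, and the rest is everything after that first '_')
def parse_list_iterator_alt (identifier : String) : Option (String × String) :=
  if (PySem.Set.ofList ["random_list", "ordered_list", "any_of", "every_one"]).contains identifier then
    none
  else
    let cs := identifier.toList
    let word := cs.takeWhile (· ≠ '_')
    let tail := cs.dropWhile (· ≠ '_')   -- sep ++ rest: '_' :: rest when a '_' exists, [] otherwise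
    if tail ≠ [] ∧ word ∈ [String.toList "any", String.toList "every", String.toList "random", String.toList "ordered"] then
      some (String.ofList (word ++ ['_']), String.ofList (tail.drop 1))
    else none

-- ===== PRECONDITION & SPEC =====
def Spec_parse_list_iterator (identifier : String) (out : Option (String × String)) : Prop := out = parse_list_iterator_alt identifier
instance (identifier : String) (out : Option (String × String)) : Decidable (Spec_parse_list_iterator identifier out) := by unfold Spec_parse_list_iterator; infer_instance

-- ===== CLAIM (what is proved, stated in full; the proofs are below) =====
def Claim_equal_parse_list_iterator : Prop := ∀ (identifier : String), Dom_parse_list_iterator identifier → Spec_parse_list_iterator identifier (parse_list_iterator identifier)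

-- ===== LEMMAS AND PROOFS =====

lemma startswith_word_underscore (w cs : List Char) (hw : ∀ c ∈ w, c ≠ '_') :
    (w ++ ['_']) <+: cs ↔
      cs.takeWhile (· ≠ '_') = w ∧ cs.dropWhile (· ≠ '_') ≠ [] := by
  induction w generalizing cs with
  | nil =>
    cases cs with
    | nil => simp
    | cons c t =>
      simp only [List.nil_append, List.cons_prefix_cons, List.takeWhile_cons, List.dropWhile_cons]
      by_cases hc : c = '_'
      · subst hc; simp
      · simp [hc, Ne.symm hc]
  | cons a w' ih =>
    have ha : a ≠ '_' := hw a (by simp)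
    have hw' : ∀ c ∈ w', c ≠ '_' := fun c hc => hw c (by simp [hc])
    cases cs with
    | nil => simp
    | cons c t =>
      simp only [List.cons_append, List.cons_prefix_cons, List.takeWhile_cons, List.dropWhile_cons]
      by_cases hc : c = '_'
      · subst hc; simp [ha]
      · have hcd : decide (c ≠ '_') = true := by simp [hc]
        rw [if_pos hcd, if_pos hcd]
        simp only [List.cons.injEq]
        rw [ih t hw']
        constructor
        · rintro ⟨h1, h2, h3⟩; exact ⟨⟨h1.symm, h2⟩, h3⟩
        · rintro ⟨⟨h1, h2⟩, h3⟩; exact ⟨h1.symm, h2, h3⟩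

lemma sw_bridge (cs w : List Char) (hw : ∀ c ∈ w, c ≠ '_') :
    PySem.Chars.startswith cs (w ++ ['_']) = true ↔
      cs.takeWhile (· ≠ '_') = w ∧ cs.dropWhile (· ≠ '_') ≠ [] := by
  rw [PySem.Chars.startswith_iff]
  exact startswith_word_underscore w cs hw

lemma main_lemma (identifier : String) :
    parse_list_iterator identifier = parse_list_iterator_alt identifier := by
  unfold parse_list_iterator parse_list_iterator_alt
  split
  · rfl
  · rename_i hcond
    have hany := sw_bridge identifier.toList ['a','n','y'] (by simp)
    have hevery := sw_bridge identifier.toList ['e','v','e','r','y'] (by simp)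
    have hrandom := sw_bridge identifier.toList ['r','a','n','d','o','m'] (by simp)
    have hordered := sw_bridge identifier.toList ['o','r','d','e','r','e','d'] (by simp)
    by_cases htail : identifier.toList.dropWhile (· ≠ '_') = []
    · have h1 : PySem.Chars.startswith identifier.toList ['a','n','y','_'] = false := by
        rw [Bool.eq_false_iff]; exact fun h => (hany.mp h).2 htail
      have h2 : PySem.Chars.startswith identifier.toList ['e','v','e','r','y','_'] = false := by
        rw [Bool.eq_false_iff]; exact fun h => (hevery.mp h).2 htail
      have h3 : PySem.Chars.startswith identifier.toList ['r','a','n','d','o','m','_'] = false := by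
        rw [Bool.eq_false_iff]; exact fun h => (hrandom.mp h).2 htail
      have h4 : PySem.Chars.startswith identifier.toList ['o','r','d','e','r','e','d','_'] = false := by
        rw [Bool.eq_false_iff]; exact fun h => (hordered.mp h).2 htail
      have hmem : '_' ∉ identifier.toList := by
        rw [List.dropWhile_eq_nil_iff] at htail
        intro hm; simpa using htail _ hm
      simp [pvLoopA, get_list_prefixes, h1, h2, h3, h4, hmem]
    · by_cases w1 : identifier.toList.takeWhile (· ≠ '_') = ['a','n','y']
      · obtain ⟨t, ht⟩ := (startswith_word_underscore ['a','n','y'] identifier.toList (by simp)).mpr ⟨w1, htail⟩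
        have hid : String.ofList ((['a','n','y'] ++ ['_']) ++ t) = identifier := by
          rw [ht, String.ofList_toList]
        rw [← hid]
        simp [pvLoopA, get_list_prefixes, PySem.Str.startswith, PySem.Chars.startswith, PySem.List.slice]
      · by_cases w2 : identifier.toList.takeWhile (· ≠ '_') = ['e','v','e','r','y']
        · obtain ⟨t, ht⟩ := (startswith_word_underscore ['e','v','e','r','y'] identifier.toList (by simp)).mpr ⟨w2, htail⟩
          have hid : String.ofList ((['e','v','e','r','y'] ++ ['_']) ++ t) = identifier := by
            rw [ht, String.ofList_toList]
          rw [← hid]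
          simp [pvLoopA, get_list_prefixes, PySem.Str.startswith, PySem.Chars.startswith, PySem.List.slice]
        · by_cases w3 : identifier.toList.takeWhile (· ≠ '_') = ['r','a','n','d','o','m']
          · obtain ⟨t, ht⟩ := (startswith_word_underscore ['r','a','n','d','o','m'] identifier.toList (by simp)).mpr ⟨w3, htail⟩
            have hid : String.ofList ((['r','a','n','d','o','m'] ++ ['_']) ++ t) = identifier := by
              rw [ht, String.ofList_toList]
            rw [← hid]
            simp [pvLoopA, get_list_prefixes, PySem.Str.startswith, PySem.Chars.startswith, PySem.List.slice]
          · by_cases w4 : identifier.toList.takeWhile (· ≠ '_') = ['o','r','d','e','r','e','d']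
            · obtain ⟨t, ht⟩ := (startswith_word_underscore ['o','r','d','e','r','e','d'] identifier.toList (by simp)).mpr ⟨w4, htail⟩
              have hid : String.ofList ((['o','r','d','e','r','e','d'] ++ ['_']) ++ t) = identifier := by
                rw [ht, String.ofList_toList]
              rw [← hid]
              simp [pvLoopA, get_list_prefixes, PySem.Str.startswith, PySem.Chars.startswith, PySem.List.slice]
            · have h1 : PySem.Chars.startswith identifier.toList ['a','n','y','_'] = false := by
                rw [Bool.eq_false_iff]; exact fun h => w1 (hany.mp h).1
              have h2 : PySem.Chars.startswith identifier.toList ['e','v','e','r','y','_'] = false := by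
                rw [Bool.eq_false_iff]; exact fun h => w2 (hevery.mp h).1
              have h3 : PySem.Chars.startswith identifier.toList ['r','a','n','d','o','m','_'] = false := by
                rw [Bool.eq_false_iff]; exact fun h => w3 (hrandom.mp h).1
              have h4 : PySem.Chars.startswith identifier.toList ['o','r','d','e','r','e','d','_'] = false := by
                rw [Bool.eq_false_iff]; exact fun h => w4 (hordered.mp h).1
              simp only [decide_not] at w1 w2 w3 w4
              simp [pvLoopA, get_list_prefixes, h1, h2, h3, h4]
              exact fun _ => ⟨w1, w2, w3, w4⟩

-- ===== VERDICT (by name: the statement is the Claim_ definition above) =====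
theorem parse_list_iterator_spec : Claim_equal_parse_list_iterator := by
  intro identifier _
  unfold Spec_parse_list_iterator
  exact main_lemma identifier
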